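-- pv_equiv track=rewrite | github.com/8fdafs2/Codewars-Solu-Python | src/kyu4_Pick_Peaks.py | pick_peaks_02
-- ===== SOURCE A (Python) =====
-- def pick_peaks_02(arr):
--     """
--     tracking list, candidate pos recorded
--     """
--     if not arr:
--         return {'pos': [], 'peaks': []}
--     pos = []
--     trends = [arr[i + 1] - arr[i] for i in range(len(arr) - 1)]
--     pos_candi = 0
--     for i in range(len(trends)):
--         if trends[i] > 0:
--             pos_candi = i + 1
--         elif trends[i] < 0:
--             if pos_candi:
--                 pos.append(pos_candi)
--             pos_candi = 0
--
--     return {'pos': pos, 'peaks': [arr[i] for i in pos]}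
-- ===== SOURCE B (Python) =====
-- def pick_peaks_02(arr):
--     """Direct look-ahead scan: no difference table, skip plateaus with an inner loop."""
--     pos = []
--     n = len(arr)
--     i = 1
--     while i < n:
--         if arr[i] > arr[i - 1]:
--             j = i
--             while j + 1 < n and arr[j + 1] == arr[i]:
--                 j += 1
--             if j + 1 < n and arr[j + 1] < arr[i]:
--                 pos.append(i)
--             i = j + 1
--         else:
--             i += 1
--     return {'pos': pos, 'peaks': [arr[p] for p in pos]}
-- ===== Notes on version B (the rewrite author's own statement) =====
-- stated objective: alternative
-- what changed: B drops A's precomputed differences list and sentinel-candidate state machine; it scans the array directly with a nested skip-plateau look-ahead loop, appending the plateau-start index when the next differing value is smaller.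
import Mathlib
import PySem

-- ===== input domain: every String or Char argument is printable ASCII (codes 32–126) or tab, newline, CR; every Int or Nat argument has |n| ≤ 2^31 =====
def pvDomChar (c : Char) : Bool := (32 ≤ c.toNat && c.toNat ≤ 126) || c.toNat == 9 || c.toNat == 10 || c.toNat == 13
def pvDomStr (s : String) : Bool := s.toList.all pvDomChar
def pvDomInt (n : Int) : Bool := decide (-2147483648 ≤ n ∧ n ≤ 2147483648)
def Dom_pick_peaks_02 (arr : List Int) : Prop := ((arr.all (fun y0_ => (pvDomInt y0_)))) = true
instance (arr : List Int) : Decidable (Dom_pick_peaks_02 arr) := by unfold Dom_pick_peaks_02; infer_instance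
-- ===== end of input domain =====

-- B replaces A's differences-list + sentinel-candidate state machine with a direct
-- look-ahead scan that skips plateaus in a nested loop (alternative decomposition, same O(n)).
-- All list indexing in both ports is provably in range, so getD is exact (Python never raises here).

-- ===== PORT A =====
-- literal transliteration of A: build the trends list, fold over its indices with (pos, pos_candi)
def pick_peaks_02 (arr : List Int) : List (String × List Int) :=
  if arr = [] then [("pos", []), ("peaks", [])]
  else
    let trends := (List.range (arr.length - 1)).map (fun i => arr.getD (i + 1) 0 - arr.getD i 0)
    let st := (List.range trends.length).foldl
      (fun (s : List Int × Int) i =>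
        if trends.getD i 0 > 0 then (s.1, (i : Int) + 1)
        else if trends.getD i 0 < 0 then
          (if s.2 ≠ 0 then s.1 ++ [s.2] else s.1, 0)
        else s) ([], 0)
    [("pos", st.1), ("peaks", st.1.map (fun i => PySem.List.pyGetD arr i 0))]

-- ===== PORT B =====
-- inner while loop of B: advance j past the run of values equal to v (= arr[i]).
-- fuel = arr.length is a totality guard only; the loop always stops before it runs out.
def pvSkip (arr : List Int) (v : Int) : Nat → Nat → Nat
  | 0, j => j
  | fuel + 1, j =>
    if j + 1 < arr.length ∧ arr.getD (j + 1) 0 = v then pvSkip arr v fuel (j + 1) else j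

-- outer while loop of B (same fuel guard: the index strictly increases each iteration)
def pvScan (arr : List Int) : Nat → Nat → List Int → List Int
  | 0, _, pos => pos
  | fuel + 1, i, pos =>
    if i < arr.length then
      if arr.getD i 0 > arr.getD (i - 1) 0 then
        let j := pvSkip arr (arr.getD i 0) arr.length i
        pvScan arr fuel (j + 1)
          (if j + 1 < arr.length ∧ arr.getD (j + 1) 0 < arr.getD i 0 then pos ++ [(i : Int)] else pos)
      else pvScan arr fuel (i + 1) pos
    else pos

def pick_peaks_02_alt (arr : List Int) : List (String × List Int) :=
  let pos := pvScan arr arr.length 1 []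
  [("pos", pos), ("peaks", pos.map (fun p => PySem.List.pyGetD arr p 0))]

-- ===== PRECONDITION & SPEC =====
def Spec_pick_peaks_02 (arr : List Int) (out : List (String × List Int)) : Prop := out = pick_peaks_02_alt arr
instance (arr : List Int) (out : List (String × List Int)) : Decidable (Spec_pick_peaks_02 arr out) := by unfold Spec_pick_peaks_02; infer_instance

-- ===== CLAIM (what is proved, stated in full; the proofs are below) =====
def Claim_equal_pick_peaks_02 : Prop := ∀ (arr : List Int), Dom_pick_peaks_02 arr → Spec_pick_peaks_02 arr (pick_peaks_02 arr)

-- ===== LEMMAS AND PROOFS =====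

-- proof-side reformulation of A's fold as a recursion over trend indices
def aRun (arr : List Int) (k : Nat) (c : Int) (p : List Int) : List Int :=
  if k + 1 < arr.length then
    if arr.getD (k + 1) 0 - arr.getD k 0 > 0 then aRun arr (k + 1) ((k : Int) + 1) p
    else if arr.getD (k + 1) 0 - arr.getD k 0 < 0 then
      aRun arr (k + 1) 0 (if c ≠ 0 then p ++ [c] else p)
    else aRun arr (k + 1) c p
  else p
termination_by arr.length - k
decreasing_by all_goals omega

theorem aRun_stop (arr : List Int) (k : Nat) (c : Int) (p : List Int)
    (h : ¬ k + 1 < arr.length) : aRun arr k c p = p := by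
  unfold aRun; simp [h]

theorem pvSkip_ge (arr : List Int) (v : Int) : ∀ fuel j, j ≤ pvSkip arr v fuel j := by
  intro fuel
  induction fuel with
  | zero => intro j; exact le_refl j
  | succ f ih =>
    intro j
    simp only [pvSkip]
    split
    next => exact le_trans (Nat.le_succ j) (ih (j + 1))
    next => exact le_refl j

theorem pvSkip_lt (arr : List Int) (v : Int) : ∀ fuel j, j < arr.length →
    pvSkip arr v fuel j < arr.length := by
  intro fuel
  induction fuel with
  | zero => intro j hj; exact hj
  | succ f ih =>
    intro j hj
    simp only [pvSkip]
    split
    next hc => exact ih (j + 1) hc.1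
    next => exact hj

-- with enough fuel the loop really stops: the stop condition fails at the result
theorem pvSkip_stop (arr : List Int) (v : Int) : ∀ fuel j, arr.length - j ≤ fuel →
    ¬ (pvSkip arr v fuel j + 1 < arr.length ∧ arr.getD (pvSkip arr v fuel j + 1) 0 = v) := by
  intro fuel
  induction fuel with
  | zero =>
    intro j hf
    simp only [pvSkip]
    exact fun hc => absurd hc.1 (by omega)
  | succ f ih =>
    intro j hf
    simp only [pvSkip]
    by_cases hc : j + 1 < arr.length ∧ arr.getD (j + 1) 0 = v
    · rw [if_pos hc]
      exact ih (j + 1) (by omega)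
    · rw [if_neg hc]
      exact hc

-- every value in the skipped run equals v (given the start does)
theorem pvSkip_plateau (arr : List Int) (v : Int) : ∀ fuel j, arr.getD j 0 = v →
    ∀ l, j ≤ l → l ≤ pvSkip arr v fuel j → arr.getD l 0 = v := by
  intro fuel
  induction fuel with
  | zero =>
    intro j hj l hl1 hl2
    simp only [pvSkip] at hl2
    have : l = j := le_antisymm hl2 hl1
    exact this ▸ hj
  | succ f ih =>
    intro j hj l hl1 hl2
    simp only [pvSkip] at hl2
    by_cases hc : j + 1 < arr.length ∧ arr.getD (j + 1) 0 = v
    · rw [if_pos hc] at hl2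
      rcases Nat.eq_or_lt_of_le hl1 with h | h
      · exact h ▸ hj
      · exact ih (j + 1) hc.2 l (by omega) hl2
    · rw [if_neg hc] at hl2
      have : l = j := le_antisymm hl2 hl1
      exact this ▸ hj

-- aRun is constant across a plateau (all trends zero)
theorem aRun_plateau (arr : List Int) (i j : Nat) (c : Int) (p : List Int)
    (hj : j < arr.length)
    (hplat : ∀ l, i ≤ l → l ≤ j → arr.getD l 0 = arr.getD i 0)
    (k : Nat) (hk1 : i ≤ k) (hk2 : k ≤ j) : aRun arr k c p = aRun arr j c p := by
  rcases Nat.eq_or_lt_of_le hk2 with h | h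
  · rw [h]
  · have hk1' : arr.getD (k + 1) 0 = arr.getD i 0 := hplat (k + 1) (by omega) (by omega)
    have hk0 : arr.getD k 0 = arr.getD i 0 := hplat k hk1 (by omega)
    have hlt : k + 1 < arr.length := by omega
    have hstep : aRun arr k c p = aRun arr (k + 1) c p := by
      rw [aRun, if_pos hlt, hk1', hk0]
      simp
    rw [hstep]
    exact aRun_plateau arr i j c p hj hplat (k + 1) (by omega) h
termination_by j - k
decreasing_by omega

-- MASTER LEMMA: B's scan from index i equals A's run over trends from index i-1 with candidate 0
theorem scan_eq_aRun (arr : List Int) : ∀ fuel i pos, 1 ≤ i → arr.length - i ≤ fuel →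
    pvScan arr fuel i pos = aRun arr (i - 1) 0 pos := by
  intro fuel
  induction fuel with
  | zero =>
    intro i pos hi hf
    simp only [pvScan]
    rw [aRun_stop arr (i - 1) 0 pos (by omega)]
  | succ f ih =>
    intro i pos hi hf
    have hi1 : i - 1 + 1 = i := by omega
    by_cases h : i < arr.length
    · simp only [pvScan]
      rw [if_pos h]
      by_cases hrise : arr.getD i 0 > arr.getD (i - 1) 0
      · rw [if_pos hrise]
        set j := pvSkip arr (arr.getD i 0) arr.length i with hjdef
        have hji : i ≤ j := pvSkip_ge arr (arr.getD i 0) arr.length i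
        have hjlt : j < arr.length := pvSkip_lt arr (arr.getD i 0) arr.length i h
        have hplat : ∀ l, i ≤ l → l ≤ j → arr.getD l 0 = arr.getD i 0 :=
          pvSkip_plateau arr (arr.getD i 0) arr.length i rfl
        have hstop := pvSkip_stop arr (arr.getD i 0) arr.length i (by omega)
        -- A takes the rising step at trend i-1, reaching aRun arr i i pos, then crosses the plateau to j
        have hstep1 : aRun arr (i - 1) 0 pos = aRun arr j ((i : Int)) pos := by
          rw [aRun]
          simp only [hi1, h, if_true]
          have : arr.getD i 0 - arr.getD (i - 1) 0 > 0 := by omega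
          simp only [this, if_true]
          have : ((i - 1 : Nat) : Int) + 1 = (i : Int) := by omega
          rw [this]
          exact aRun_plateau arr i j ((i : Int)) pos hjlt hplat i (le_refl i) hji
        rw [hstep1]
        by_cases hend : j + 1 < arr.length
        · have hne : arr.getD (j + 1) 0 ≠ arr.getD i 0 := by
            intro hc; exact hstop ⟨hend, hc⟩
          have hj0 : arr.getD j 0 = arr.getD i 0 := hplat j hji (le_refl j)
          by_cases hfall : arr.getD (j + 1) 0 < arr.getD i 0
          · -- fall: A appends the candidate i, B appends i
            simp only [hend, hfall, and_true]
            rw [aRun]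
            simp only [hend, if_true, hj0]
            have h1 : ¬ (arr.getD (j + 1) 0 - arr.getD i 0 > 0) := by omega
            have h2 : arr.getD (j + 1) 0 - arr.getD i 0 < 0 := by omega
            simp only [h1, if_false, h2, if_true]
            have hci : ((i : Int)) ≠ 0 := by positivity
            simp only [hci, if_true, ne_eq, not_false_iff]
            rw [ih (j + 1) (pos ++ [(i : Int)]) (by omega) (by omega)]
            have : j + 1 - 1 = j := by omega
            rw [this, aRun]
            simp only [hend, if_true, hj0, h1, if_false, h2, if_true]
            simp
          · -- further rise after the plateau: both continue from j+1
            have hgt : arr.getD (j + 1) 0 > arr.getD i 0 := by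
              rcases lt_trichotomy (arr.getD (j + 1) 0) (arr.getD i 0) with h' | h' | h'
              · exact absurd h' hfall
              · exact absurd h' hne
              · exact h'
            have hnc : ¬ (j + 1 < arr.length ∧ arr.getD (j + 1) 0 < arr.getD i 0) :=
              fun hc => hfall hc.2
            simp only [hnc, if_false]
            rw [aRun]
            simp only [hend, if_true, hj0]
            have h1 : arr.getD (j + 1) 0 - arr.getD i 0 > 0 := by omega
            simp only [h1, if_true]
            rw [ih (j + 1) pos (by omega) (by omega)]
            have : j + 1 - 1 = j := by omega
            rw [this, aRun]
            simp only [hend, if_true, hj0, h1, if_true]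
        · -- the plateau reaches the end: no peak recorded, both finish with pos
          have hnc : ¬ (j + 1 < arr.length ∧ arr.getD (j + 1) 0 < arr.getD i 0) :=
            fun hc => hend hc.1
          simp only [hnc, if_false]
          rw [aRun_stop arr j _ pos hend]
          rw [ih (j + 1) pos (by omega) (by omega)]
          have : j + 1 - 1 = j := by omega
          rw [this, aRun_stop arr j 0 pos hend]
      · -- no rise at i: trend i-1 ≤ 0, A's candidate is 0 so nothing is appended
        rw [if_neg hrise]
        rw [ih (i + 1) pos (by omega) (by omega)]
        have : i + 1 - 1 = i := by omega
        rw [this]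
        have h1 : ¬ (arr.getD i 0 - arr.getD (i - 1) 0 > 0) := by omega
        have hstep : aRun arr (i - 1) 0 pos = aRun arr i 0 pos := by
          rw [aRun]
          simp only [hi1, h, if_true, h1, if_false]
          simp
        rw [hstep]
    · simp only [pvScan]
      rw [if_neg h]
      rw [aRun_stop]
      omega

-- A's fold over a suffix of the trend indices equals aRun
theorem foldA_eq_aRun (arr : List Int) (m : Nat) (hm : m + 1 = arr.length) :
    ∀ k c p, k ≤ m →
    ((List.range' k (m - k)).foldl
      (fun (s : List Int × Int) i =>
        if (((List.range m).map (fun i => arr.getD (i + 1) 0 - arr.getD i 0)).getD i 0) > 0 then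
          (s.1, (i : Int) + 1)
        else if (((List.range m).map (fun i => arr.getD (i + 1) 0 - arr.getD i 0)).getD i 0) < 0 then
          (if s.2 ≠ 0 then s.1 ++ [s.2] else s.1, 0)
        else s) (p, c)).1 = aRun arr k c p := by
  intro k c p hk
  rcases Nat.eq_or_lt_of_le hk with h | h
  · subst h
    simp only [Nat.sub_self, List.range'_zero, List.foldl_nil]
    rw [aRun_stop arr k c p (by omega)]
  · have hrange : m - k = (m - (k + 1)) + 1 := by omega
    rw [hrange, List.range'_succ, List.foldl_cons]
    have htr : (((List.range m).map (fun i => arr.getD (i + 1) 0 - arr.getD i 0)).getD k 0)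
        = arr.getD (k + 1) 0 - arr.getD k 0 := by
      rw [List.getD_eq_getElem?_getD, List.getElem?_map, List.getElem?_range h]
      simp
    rw [aRun]
    simp only [htr]
    have hkl : k + 1 < arr.length := by omega
    simp only [hkl, if_true]
    by_cases h1 : arr.getD (k + 1) 0 - arr.getD k 0 > 0
    · simp only [h1, if_true]
      exact foldA_eq_aRun arr m hm (k + 1) ((k : Int) + 1) p (by omega)
    · simp only [h1, if_false]
      by_cases h2 : arr.getD (k + 1) 0 - arr.getD k 0 < 0
      · simp only [h2, if_true]
        by_cases hc : c ≠ 0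
        · rw [if_pos hc]
          exact foldA_eq_aRun arr m hm (k + 1) 0 (p ++ [c]) (by omega)
        · rw [if_neg hc]
          exact foldA_eq_aRun arr m hm (k + 1) 0 p (by omega)
      · simp only [h2, if_false]
        exact foldA_eq_aRun arr m hm (k + 1) c p (by omega)
termination_by k => m - k
decreasing_by all_goals omega

-- ===== VERDICT (by name: the statement is the Claim_ definition above) =====
theorem pick_peaks_02_spec : Claim_equal_pick_peaks_02 := by
  unfold Claim_equal_pick_peaks_02
  intro arr _
  unfold Spec_pick_peaks_02 pick_peaks_02 pick_peaks_02_alt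
  by_cases he : arr = []
  · subst he
    simp [pvScan]
  · simp only [he, if_false]
    have hlen : 1 ≤ arr.length := by
      cases arr with
      | nil => exact absurd rfl he
      | cons a t => simp
    have hm : (arr.length - 1) + 1 = arr.length := by omega
    have hfold := foldA_eq_aRun arr (arr.length - 1) hm 0 0 [] (by omega)
    have hscan := scan_eq_aRun arr arr.length 1 [] (le_refl 1) (by omega)
    simp only [Nat.sub_zero] at hfold
    have hlenmap : ((List.range (arr.length - 1)).map
        (fun i => arr.getD (i + 1) 0 - arr.getD i 0)).length = arr.length - 1 := by
      simp
    simp only [hlenmap]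
    rw [List.range_eq_range'] at hfold ⊢
    simp only [hfold, hscan]
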